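-- pv_equiv track=rewrite | github.com/achacham/RecipeGen | video_generator.py | generate_ingredient_specific_actions
-- ===== SOURCE A (Python) =====
-- from typing import Dict, List, Tuple, Optional
--
-- def generate_ingredient_specific_actions(ingredients: List[str], dish_type: str = "") -> List[str]:
--     """
--     DYNAMICALLY generate BRIEF cooking actions focused on cooking, not prep
--     """
--     actions = []
--
--     # FUSION FIX: Ensure pasta is visible in pasta dishes
--     if dish_type and 'pasta' in dish_type.lower():
--         actions.append("cooking pasta noodles until al dente")
--
--     for ingredient in ingredients:
--         ingredient_lower = ingredient.lower()
--
--         # BRIEF actions focused on cooking application, not prep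
--         if any(fish in ingredient_lower for fish in ['salmon', 'tuna', 'cod', 'fish', 'trout']):
--             actions.append(f"adding {ingredient} pieces to hot pan")
--         elif any(liquid in ingredient_lower for liquid in ['sauce', 'oil', 'vinegar', 'wine', 'broth']):
--             actions.append(f"drizzling {ingredient} over ingredients")
--         elif any(herb in ingredient_lower for herb in ['scallion', 'onion', 'chive', 'green onion']):
--             actions.append(f"tossing in chopped {ingredient}")
--         elif any(spice in ingredient_lower for spice in ['garlic', 'ginger', 'shallot']):
--             actions.append(f"adding minced {ingredient} to sizzling pan")
--         elif any(veg in ingredient_lower for veg in ['tomato', 'pepper', 'carrot', 'celery']):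
--             actions.append(f"stirring in diced {ingredient}")
--         elif any(meat in ingredient_lower for meat in ['chicken', 'beef', 'pork', 'lamb']):
--             actions.append(f"searing {ingredient} pieces in hot oil")
--         else:
--             actions.append(f"incorporating {ingredient} into the cooking")
--
--     # FUSION FIX: Add pasta combining step for pasta dishes
--     if dish_type and 'pasta' in dish_type.lower():
--         actions.append("tossing cooked pasta with all the prepared ingredients")
--
--     return actions
-- ===== SOURCE B (Python) =====
-- _RULES = [
--     (('salmon', 'tuna', 'cod', 'fish', 'trout'), "adding {} pieces to hot pan"),
--     (('sauce', 'oil', 'vinegar', 'wine', 'broth'), "drizzling {} over ingredients"),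
--     (('scallion', 'onion', 'chive', 'green onion'), "tossing in chopped {}"),
--     (('garlic', 'ginger', 'shallot'), "adding minced {} to sizzling pan"),
--     (('tomato', 'pepper', 'carrot', 'celery'), "stirring in diced {}"),
--     (('chicken', 'beef', 'pork', 'lamb'), "searing {} pieces in hot oil"),
-- ]
--
-- def generate_ingredient_specific_actions(ingredients, dish_type=""):
--     # Rule-major passes: start with every ingredient on the default template, then
--     # sweep the rules from LOWEST priority to HIGHEST, overwriting the template of
--     # each matching ingredient; the last overwrite is the highest-priority match,
--     # so each ingredient ends on its first matching rule (as in A's if/elif chain).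
--     lows = [ing.lower() for ing in ingredients]
--     templates = ["incorporating {} into the cooking"] * len(ingredients)
--     for keywords, template in reversed(_RULES):
--         for i, low in enumerate(lows):
--             if any(k in low for k in keywords):
--                 templates[i] = template
--     out = [t.format(ing) for t, ing in zip(templates, ingredients)]
--     if 'pasta' in dish_type.lower():
--         out = (["cooking pasta noodles until al dente"] + out
--                + ["tossing cooked pasta with all the prepared ingredients"])
--     return out
-- ===== Notes on version B (the rewrite author's own statement) =====
-- stated objective: alternative
-- what changed: Inverted the loop nesting: instead of A's per-ingredient if/elif first-match chain, B makes rule-major passes over all ingredients, sweeping the rules in reverse priority order and overwriting a template array so the last overwrite (= highest-priority match) wins, then formats the array in one final pass.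
import Mathlib
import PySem

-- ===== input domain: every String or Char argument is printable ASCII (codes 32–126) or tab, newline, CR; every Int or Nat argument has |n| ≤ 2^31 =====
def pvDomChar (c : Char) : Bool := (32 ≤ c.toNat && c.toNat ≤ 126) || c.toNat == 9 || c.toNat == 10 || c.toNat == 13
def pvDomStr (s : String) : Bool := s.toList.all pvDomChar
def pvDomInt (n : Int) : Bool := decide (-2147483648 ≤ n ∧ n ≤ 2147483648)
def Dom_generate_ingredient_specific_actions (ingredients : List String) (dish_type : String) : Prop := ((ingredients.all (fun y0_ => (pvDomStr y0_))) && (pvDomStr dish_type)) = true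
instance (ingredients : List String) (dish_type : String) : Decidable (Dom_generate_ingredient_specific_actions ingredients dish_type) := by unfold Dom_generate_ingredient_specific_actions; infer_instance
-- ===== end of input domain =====

-- B inverts the loop nesting: rule-major reverse-priority sweeps overwriting a template
-- array (last overwrite = highest-priority match) instead of A's per-ingredient if/elif
-- chain (objective: alternative).

-- ===== PORT A =====
-- any(k in low for k in kws)
def pvHas (kws : List String) (low : String) : Bool := kws.any (fun k => PySem.Str.isIn k low)

-- one loop iteration of A: the if/elif chain appending to `actions`
def pvStepA (actions : List String) (ingredient : String) : List String :=
  let ingredient_lower := PySem.Str.lower ingredient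
  if pvHas ["salmon", "tuna", "cod", "fish", "trout"] ingredient_lower then
    actions ++ ["adding " ++ ingredient ++ " pieces to hot pan"]
  else if pvHas ["sauce", "oil", "vinegar", "wine", "broth"] ingredient_lower then
    actions ++ ["drizzling " ++ ingredient ++ " over ingredients"]
  else if pvHas ["scallion", "onion", "chive", "green onion"] ingredient_lower then
    actions ++ ["tossing in chopped " ++ ingredient]
  else if pvHas ["garlic", "ginger", "shallot"] ingredient_lower then
    actions ++ ["adding minced " ++ ingredient ++ " to sizzling pan"]
  else if pvHas ["tomato", "pepper", "carrot", "celery"] ingredient_lower then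
    actions ++ ["stirring in diced " ++ ingredient]
  else if pvHas ["chicken", "beef", "pork", "lamb"] ingredient_lower then
    actions ++ ["searing " ++ ingredient ++ " pieces in hot oil"]
  else
    actions ++ ["incorporating " ++ ingredient ++ " into the cooking"]

def generate_ingredient_specific_actions (ingredients : List String) (dish_type : String) : List String :=
  let actions : List String := []
  let actions :=
    if decide (dish_type ≠ "") && PySem.Str.isIn "pasta" (PySem.Str.lower dish_type) then
      actions ++ ["cooking pasta noodles until al dente"]
    else actions
  let actions := ingredients.foldl pvStepA actions
  if decide (dish_type ≠ "") && PySem.Str.isIn "pasta" (PySem.Str.lower dish_type) then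
    actions ++ ["tossing cooked pasta with all the prepared ingredients"]
  else actions

-- ===== PORT B =====
-- the rule table; a template "{pre}{}{post}" is the pair (pre, post)
def pvRules : List (List String × String × String) :=
  [ (["salmon", "tuna", "cod", "fish", "trout"], "adding ", " pieces to hot pan"),
    (["sauce", "oil", "vinegar", "wine", "broth"], "drizzling ", " over ingredients"),
    (["scallion", "onion", "chive", "green onion"], "tossing in chopped ", ""),
    (["garlic", "ginger", "shallot"], "adding minced ", " to sizzling pan"),
    (["tomato", "pepper", "carrot", "celery"], "stirring in diced ", ""),
    (["chicken", "beef", "pork", "lamb"], "searing ", " pieces in hot oil") ]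

-- one rule-major sweep: overwrite the template of every matching ingredient
def pvSweep (lows : List String) (tmpls : List (String × String))
    (r : List String × String × String) : List (String × String) :=
  List.zipWith (fun low cur => if pvHas r.1 low then r.2 else cur) lows tmpls

def generate_ingredient_specific_actions_alt (ingredients : List String) (dish_type : String) : List String :=
  let lows := ingredients.map PySem.Str.lower
  let templates0 := lows.map (fun _ => (("incorporating ", " into the cooking") : String × String))
  let templates := pvRules.reverse.foldl (pvSweep lows) templates0
  let out := List.zipWith (fun t ing => t.1 ++ ing ++ t.2) templates ingredients
  if PySem.Str.isIn "pasta" (PySem.Str.lower dish_type) then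
    ["cooking pasta noodles until al dente"] ++ out
      ++ ["tossing cooked pasta with all the prepared ingredients"]
  else out

-- ===== PRECONDITION & SPEC =====
def Spec_generate_ingredient_specific_actions (ingredients : List String) (dish_type : String) (out : List String) : Prop := out = generate_ingredient_specific_actions_alt ingredients dish_type
instance (ingredients : List String) (dish_type : String) (out : List String) : Decidable (Spec_generate_ingredient_specific_actions ingredients dish_type out) := by unfold Spec_generate_ingredient_specific_actions; infer_instance

-- ===== CLAIM (what is proved, stated in full; the proofs are below) =====
def Claim_equal_generate_ingredient_specific_actions : Prop := ∀ (ingredients : List String) (dish_type : String), Dom_generate_ingredient_specific_actions ingredients dish_type → Spec_generate_ingredient_specific_actions ingredients dish_type (generate_ingredient_specific_actions ingredients dish_type)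

-- ===== LEMMAS AND PROOFS =====
-- per-ingredient result of B's reverse-priority overwrite (proof-only helper)
def pvSlot (ing : String) : String :=
  let t := pvRules.reverse.foldl
      (fun cur r => if pvHas r.1 (PySem.Str.lower ing) then r.2 else cur)
      (("incorporating ", " into the cooking") : String × String)
  t.1 ++ ing ++ t.2

-- zipWith of a mapped list against the list itself fuses into one map
theorem pvZipWith_map_left {α β δ : Type} (h : β → α → δ) (f : α → β)
    (l : List α) : List.zipWith h (l.map f) l = l.map (fun x => h (f x) x) := by
  induction l with
  | nil => rfl
  | cons x xs ih => simp [ih]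

-- zipWith over two maps of the same list fuses into one map
theorem pvZipWith_map_map {α β γ δ : Type} (h : β → γ → δ) (f : α → β) (g : α → γ)
    (l : List α) : List.zipWith h (l.map f) (l.map g) = l.map (fun x => h (f x) (g x)) := by
  induction l with
  | nil => rfl
  | cons x xs ih => simp [ih]

-- the rule-major fold acts pointwise on each slot
theorem pvFold_sweep (rs : List (List String × String × String)) (l : List String)
    (f : String → String × String) :
    rs.foldl (pvSweep l) (l.map f)
      = l.map (fun low => rs.foldl (fun cur r => if pvHas r.1 low then r.2 else cur) (f low)) := by
  induction rs generalizing f with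
  | nil => rfl
  | cons r rest ih =>
      have : pvSweep l (l.map f) r
          = l.map (fun low => if pvHas r.1 low then r.2 else f low) := by
        have := pvZipWith_map_map (fun low cur => if pvHas r.1 low then r.2 else cur) id f l
        simpa [pvSweep] using this
      simp [List.foldl, this, ih]

-- per-ingredient: the reverse-priority overwrite ends on A's first matching branch
theorem pvStepA_eq (actions : List String) (ingredient : String) :
    pvStepA actions ingredient
      = actions ++ [pvSlot ingredient] := by
  unfold pvStepA pvSlot pvRules
  obtain h1 | h1 := Bool.eq_false_or_eq_true (pvHas ["salmon", "tuna", "cod", "fish", "trout"] (PySem.Str.lower ingredient)) <;>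
  obtain h2 | h2 := Bool.eq_false_or_eq_true (pvHas ["sauce", "oil", "vinegar", "wine", "broth"] (PySem.Str.lower ingredient)) <;>
  obtain h3 | h3 := Bool.eq_false_or_eq_true (pvHas ["scallion", "onion", "chive", "green onion"] (PySem.Str.lower ingredient)) <;>
  obtain h4 | h4 := Bool.eq_false_or_eq_true (pvHas ["garlic", "ginger", "shallot"] (PySem.Str.lower ingredient)) <;>
  obtain h5 | h5 := Bool.eq_false_or_eq_true (pvHas ["tomato", "pepper", "carrot", "celery"] (PySem.Str.lower ingredient)) <;>
  obtain h6 | h6 := Bool.eq_false_or_eq_true (pvHas ["chicken", "beef", "pork", "lamb"] (PySem.Str.lower ingredient)) <;>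
  simp [h1, h2, h3, h4, h5, h6]

theorem pvFoldA_eq (ingredients : List String) (init : List String) :
    ingredients.foldl pvStepA init
      = init ++ ingredients.map pvSlot := by
  induction ingredients generalizing init with
  | nil => simp
  | cons i rest ih => simp [List.foldl, pvStepA_eq, ih]

theorem pvPasta_eq (dish_type : String) :
    (decide (dish_type ≠ "") && PySem.Str.isIn "pasta" (PySem.Str.lower dish_type))
      = PySem.Str.isIn "pasta" (PySem.Str.lower dish_type) := by
  by_cases h : dish_type = ""
  · subst h; decide
  · simp [h]

-- ===== VERDICT (by name: the statement is the Claim_ definition above) =====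
theorem generate_ingredient_specific_actions_spec : Claim_equal_generate_ingredient_specific_actions := by
  intro ingredients dish_type _
  unfold Spec_generate_ingredient_specific_actions
  unfold generate_ingredient_specific_actions generate_ingredient_specific_actions_alt
  simp only [pvPasta_eq, pvFoldA_eq]
  rw [pvFold_sweep]
  simp only [List.map_map, pvZipWith_map_left]
  split_ifs <;> simp [pvSlot]
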